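-- pv_equiv track=rewrite | github.com/Agentic-Environmental-Engineering/GymVerse | gem/gem/envs/RLVE/largest_rectangle_among_points_env.py | _compute_max_rectangle_area
-- ===== SOURCE A (Python) =====
-- from typing import Any, List, Optional, SupportsFloat, Tuple
--
-- def _compute_max_rectangle_area(points: List[Tuple[int, int]]) -> int:
--     """
--     Compute the maximum rectangle area that can be formed by the given points.
--
--     Approach:
--     - Enumerate all point pairs as potential diagonals.
--     - Group by equal squared length and equal midpoint (represented by doubled midpoint).
--     - For each pair of diagonals in the same group, compute rectangle area using cross product trick.
--     """
--     n = len(points)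
--     lines: List[Tuple[int, int, int, int, int]] = []
--
--     # Build list of all point pairs (diagonals): (squared_length, sum_x, sum_y, idx1, idx2)
--     for i in range(n):
--         xi, yi = points[i]
--         for j in range(i + 1, n):
--             xj, yj = points[j]
--             dx = xi - xj
--             dy = yi - yj
--             s = dx * dx + dy * dy
--             sx = xi + xj  # midpoint * 2
--             sy = yi + yj
--             lines.append((s, sx, sy, i, j))
--
--     # Sort by (length, midpoint_x, midpoint_y)
--     lines.sort(key=lambda t: (t[0], t[1], t[2]))
--
--     ans = 0
--     m = len(lines)
--     i = 0
--     while i < m: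
--         s0, sx0, sy0, idx1, idx2 = lines[i]
--         j = i + 1
--         # Process other diagonals with the same (s, sx, sy)
--         while j < m and lines[j][0] == s0 and lines[j][1] == sx0 and lines[j][2] == sy0:
--             _, _, _, idx3, _ = lines[j]
--             # Compute area = |(C − A) × (B − A)| where A=points[idx1], C=points[idx2], B=points[idx3]
--             x1, y1 = points[idx1]  # A
--             x2, y2 = points[idx2]  # C (opposite)
--             x3, y3 = points[idx3]  # B (one endpoint of the other diagonal)
--             tmp = abs(x1 * y2 + x2 * y3 + x3 * y1 - x2 * y1 - x3 * y2 - x1 * y3)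
--             if tmp > ans:
--                 ans = tmp
--             j += 1
--         i += 1
--
--     return ans
-- ===== SOURCE B (Python) =====
-- from typing import List, Tuple
--
-- def _compute_max_rectangle_area(points: List[Tuple[int, int]]) -> int:
--     """
--     Group diagonals by (squared length, doubled midpoint) in a dict built in one
--     pass (no sorting), then compare each pair of diagonals within a group.
--     """
--     n = len(points)
--     groups = {}
--     for i in range(n):
--         xi, yi = points[i]
--         for j in range(i + 1, n):
--             xj, yj = points[j]
--             dx = xi - xj
--             dy = yi - yj
--             key = (dx * dx + dy * dy, xi + xj, yi + yj)
--             groups.setdefault(key, []).append((i, j))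
--
--     ans = 0
--     for g in groups.values():
--         for a in range(len(g)):
--             idx1, idx2 = g[a]
--             x1, y1 = points[idx1]
--             x2, y2 = points[idx2]
--             for b in range(a + 1, len(g)):
--                 idx3 = g[b][0]
--                 x3, y3 = points[idx3]
--                 tmp = abs(x1 * y2 + x2 * y3 + x3 * y1 - x2 * y1 - x3 * y2 - x1 * y3)
--                 if tmp > ans:
--                     ans = tmp
--     return ans
-- ===== Notes on version B (the rewrite author's own statement) =====
-- stated objective: faster
-- what changed: Replaces the sort of all O(n^2) diagonals plus run-scanning by a one-pass dict that groups diagonals by (squared length, doubled midpoint), then compares diagonal pairs within each group.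
import Mathlib
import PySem

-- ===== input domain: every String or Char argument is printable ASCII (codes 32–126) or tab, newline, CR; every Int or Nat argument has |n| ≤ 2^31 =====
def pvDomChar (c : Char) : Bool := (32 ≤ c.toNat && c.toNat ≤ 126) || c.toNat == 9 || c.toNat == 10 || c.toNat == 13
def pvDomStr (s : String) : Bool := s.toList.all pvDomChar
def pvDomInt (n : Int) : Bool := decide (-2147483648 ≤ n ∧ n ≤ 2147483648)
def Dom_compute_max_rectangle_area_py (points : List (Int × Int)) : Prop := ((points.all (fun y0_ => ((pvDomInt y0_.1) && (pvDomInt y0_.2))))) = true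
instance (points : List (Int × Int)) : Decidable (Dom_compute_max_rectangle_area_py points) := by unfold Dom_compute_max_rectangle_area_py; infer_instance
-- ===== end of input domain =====

-- B replaces A's sort of all O(n^2) diagonals (plus equal-key run scanning) by a dict grouping
-- diagonals by (squared length, doubled midpoint); objective: faster (no sort).

-- ===== PORT A =====
-- one diagonal record (s, sx, sy, i, j); points[i] is read with pyGetD — the indices stored in
-- lines are always in range, so the default is never the value Python would not compute
def pvEnt (points : List (Int × Int)) (i j : Int) : Int × Int × Int × Int × Int :=
  let p := PySem.List.pyGetD points i (0, 0)
  let q := PySem.List.pyGetD points j (0, 0)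
  ((p.1 - q.1) * (p.1 - q.1) + (p.2 - q.2) * (p.2 - q.2), p.1 + q.1, p.2 + q.2, i, j)

def pvLinesA (points : List (Int × Int)) : List (Int × Int × Int × Int × Int) :=
  (PySem.List.pyRange 0 (points.length : Int) 1).foldl (fun lines i =>
    (PySem.List.pyRange (i + 1) (points.length : Int) 1).foldl (fun lines j =>
      lines ++ [pvEnt points i j]) lines) []

-- sort key (t[0], t[1], t[2]) — Python tuple comparison is lexicographic
def pvKeyA (e : Int × Int × Int × Int × Int) : Lex (Int × Lex (Int × Int)) :=
  toLex (e.1, toLex (e.2.1, e.2.2.1))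

-- the inner while loop: scan following entries while they have the same (s, sx, sy)
def pvAInner (points : List (Int × Int)) (e : Int × Int × Int × Int × Int) :
    List (Int × Int × Int × Int × Int) → Int → Int
  | [], ans => ans
  | f :: rest, ans =>
    if f.1 = e.1 ∧ f.2.1 = e.2.1 ∧ f.2.2.1 = e.2.2.1 then
      let p1 := PySem.List.pyGetD points e.2.2.2.1 (0, 0)
      let p2 := PySem.List.pyGetD points e.2.2.2.2 (0, 0)
      let p3 := PySem.List.pyGetD points f.2.2.2.1 (0, 0)
      let tmp := |p1.1 * p2.2 + p2.1 * p3.2 + p3.1 * p1.2 - p2.1 * p1.2 - p3.1 * p2.2 - p1.1 * p3.2|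
      pvAInner points e rest (if tmp > ans then tmp else ans)
    else ans

-- the outer while loop: every index i is an anchor in turn
def pvAOuter (points : List (Int × Int)) :
    List (Int × Int × Int × Int × Int) → Int → Int
  | [], ans => ans
  | e :: rest, ans => pvAOuter points rest (pvAInner points e rest ans)

def compute_max_rectangle_area_py (points : List (Int × Int)) : Int :=
  pvAOuter points (PySem.List.sorted (pvLinesA points) pvKeyA) 0

-- ===== PORT B =====
-- groups.setdefault(key, []).append((i, j))
def pvGroups (points : List (Int × Int)) : PySem.Dict (Int × Int × Int) (List (Int × Int)) :=
  (PySem.List.pyRange 0 (points.length : Int) 1).foldl (fun d i =>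
    let p := PySem.List.pyGetD points i (0, 0)
    (PySem.List.pyRange (i + 1) (points.length : Int) 1).foldl (fun d j =>
      let q := PySem.List.pyGetD points j (0, 0)
      let dx := p.1 - q.1
      let dy := p.2 - q.2
      d.modify (dx * dx + dy * dy, p.1 + q.1, p.2 + q.2) [] (· ++ [(i, j)])) d)
    PySem.Dict.empty

-- for b in range(a+1, len(g)): one fixed diagonal (p1, p2) against g[b]
def pvBInner (points : List (Int × Int)) (p1 p2 : Int × Int) :
    List (Int × Int) → Int → Int
  | [], ans => ans
  | pr :: rest, ans =>
    let p3 := PySem.List.pyGetD points pr.1 (0, 0)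
    let tmp := |p1.1 * p2.2 + p2.1 * p3.2 + p3.1 * p1.2 - p2.1 * p1.2 - p3.1 * p2.2 - p1.1 * p3.2|
    pvBInner points p1 p2 rest (if tmp > ans then tmp else ans)

-- for a in range(len(g))
def pvBOuter (points : List (Int × Int)) :
    List (Int × Int) → Int → Int
  | [], ans => ans
  | pr :: rest, ans =>
    let p1 := PySem.List.pyGetD points pr.1 (0, 0)
    let p2 := PySem.List.pyGetD points pr.2 (0, 0)
    pvBOuter points rest (pvBInner points p1 p2 rest ans)

def compute_max_rectangle_area_py_alt (points : List (Int × Int)) : Int :=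
  (pvGroups points).values.foldl (fun ans g => pvBOuter points g ans) 0

-- ===== PRECONDITION & SPEC =====
def Spec_compute_max_rectangle_area_py (points : List (Int × Int)) (out : Int) : Prop := out = compute_max_rectangle_area_py_alt points
instance (points : List (Int × Int)) (out : Int) : Decidable (Spec_compute_max_rectangle_area_py points out) := by unfold Spec_compute_max_rectangle_area_py; infer_instance

-- ===== CLAIM (what is proved, stated in full; the proofs are below) =====
def Claim_equal_compute_max_rectangle_area_py : Prop := ∀ (points : List (Int × Int)), Dom_compute_max_rectangle_area_py points → Spec_compute_max_rectangle_area_py points (compute_max_rectangle_area_py points)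

-- ===== LEMMAS AND PROOFS =====

-- abbreviations used only by the proofs
def pvP (points : List (Int × Int)) (i : Int) : Int × Int := PySem.List.pyGetD points i (0, 0)

def pvKey3 (e : Int × Int × Int × Int × Int) : Int × Int × Int := (e.1, e.2.1, e.2.2.1)

def pvIdx (e : Int × Int × Int × Int × Int) : Int × Int := (e.2.2.2.1, e.2.2.2.2)

-- the area value computed from a pair of diagonals (a anchors idx1, idx2; b supplies idx3)
def pvV (points : List (Int × Int)) (a b : Int × Int) : Int :=
  |(pvP points a.1).1 * (pvP points a.2).2 + (pvP points a.2).1 * (pvP points b.1).2 +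
    (pvP points b.1).1 * (pvP points a.1).2 - (pvP points a.2).1 * (pvP points a.1).2 -
    (pvP points b.1).1 * (pvP points a.2).2 - (pvP points a.1).1 * (pvP points b.1).2|

def pvStep (ans t : Int) : Int := if t > ans then t else ans

def pvM (points : List (Int × Int)) (e f : Int × Int × Int × Int × Int) : Option Int :=
  if f.1 = e.1 ∧ f.2.1 = e.2.1 ∧ f.2.2.1 = e.2.2.1 then some (pvV points (pvIdx e) (pvIdx f)) else none

def pvPairs {α : Type} : List α → List (α × α)
  | [] => []
  | x :: xs => xs.map (fun y => (x, y)) ++ pvPairs xs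

def pvVals (points : List (Int × Int)) (L : List (Int × Int × Int × Int × Int)) : List Int :=
  (pvPairs L).filterMap (fun pq => pvM points pq.1 pq.2)

-- the entry is well formed: its doubled midpoint is the sum of the two looked-up endpoints
def pvWF (points : List (Int × Int)) (e : Int × Int × Int × Int × Int) : Prop :=
  (pvP points e.2.2.2.1).1 + (pvP points e.2.2.2.2).1 = e.2.1 ∧
  (pvP points e.2.2.2.1).2 + (pvP points e.2.2.2.2).2 = e.2.2.1

lemma pvStep_rc : RightCommutative pvStep := by
  constructor; intro a b c; simp only [pvStep]; split_ifs <;> omega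

lemma pvKey3_iff (e f : Int × Int × Int × Int × Int) :
    (f.1 = e.1 ∧ f.2.1 = e.2.1 ∧ f.2.2.1 = e.2.2.1) ↔ pvKey3 f = pvKey3 e := by
  simp [pvKey3, Prod.ext_iff]

lemma pvKeyA_eq_iff (e f : Int × Int × Int × Int × Int) :
    pvKeyA e = pvKeyA f ↔ pvKey3 e = pvKey3 f := by
  simp [pvKeyA, pvKey3, toLex, Prod.ext_iff]

lemma pvCross_symm (a1 a2 c1 c2 b1 b2 d1 d2 sx sy : Int)
    (h1 : a1 + c1 = sx) (h2 : a2 + c2 = sy) (h3 : b1 + d1 = sx) (h4 : b2 + d2 = sy) :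
    |a1 * c2 + c1 * b2 + b1 * a2 - c1 * a2 - b1 * c2 - a1 * b2| =
    |b1 * d2 + d1 * a2 + a1 * b2 - d1 * b2 - a1 * d2 - b1 * a2| := by
  have hc1 : c1 = sx - a1 := by omega
  have hc2 : c2 = sy - a2 := by omega
  have hd1 : d1 = sx - b1 := by omega
  have hd2 : d2 = sy - b2 := by omega
  have h : b1 * d2 + d1 * a2 + a1 * b2 - d1 * b2 - a1 * d2 - b1 * a2 =
      -(a1 * c2 + c1 * b2 + b1 * a2 - c1 * a2 - b1 * c2 - a1 * b2) := by
    rw [hc1, hc2, hd1, hd2]; ring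
  rw [h, abs_neg]

lemma pvM_symm (points : List (Int × Int)) (e f : Int × Int × Int × Int × Int)
    (hwe : pvWF points e) (hwf : pvWF points f) : pvM points e f = pvM points f e := by
  by_cases h : pvKey3 f = pvKey3 e
  · have h1 := (pvKey3_iff e f).mpr h
    have h2 := (pvKey3_iff f e).mpr h.symm
    simp only [pvM, if_pos h1, if_pos h2, Option.some_inj]
    obtain ⟨he1, he2⟩ := hwe
    obtain ⟨hf1, hf2⟩ := hwf
    have hsx : f.2.1 = e.2.1 := h1.2.1
    have hsy : f.2.2.1 = e.2.2.1 := h1.2.2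
    simp only [pvV, pvIdx]
    exact pvCross_symm _ _ _ _ _ _ _ _ e.2.1 e.2.2.1 he1 he2
      (by rw [← hsx]; exact hf1) (by rw [← hsy]; exact hf2)
  · have h1 : ¬(f.1 = e.1 ∧ f.2.1 = e.2.1 ∧ f.2.2.1 = e.2.2.1) :=
      fun hc => h ((pvKey3_iff e f).mp hc)
    have h2 : ¬(e.1 = f.1 ∧ e.2.1 = f.2.1 ∧ e.2.2.1 = f.2.2.1) :=
      fun hc => h (((pvKey3_iff f e).mp hc).symm)
    simp only [pvM, if_neg h1, if_neg h2]

lemma pvVals_cons (points : List (Int × Int)) (e : Int × Int × Int × Int × Int)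
    (rest : List (Int × Int × Int × Int × Int)) :
    pvVals points (e :: rest) = rest.filterMap (pvM points e) ++ pvVals points rest := by
  simp [pvVals, pvPairs, List.filterMap_append, List.filterMap_map, Function.comp]

lemma pvVals_perm (points : List (Int × Int)) {L1 L2 : List (Int × Int × Int × Int × Int)}
    (h : L1.Perm L2) (hwf : ∀ e ∈ L1, pvWF points e) :
    (pvVals points L1).Perm (pvVals points L2) := by
  induction h with
  | nil => exact .refl _
  | cons x h ih =>
    rw [pvVals_cons, pvVals_cons]
    exact (h.filterMap _).append (ih (fun e he => hwf e (List.mem_cons_of_mem _ he)))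
  | swap x y l =>
    have hx : pvWF points x := hwf x (by simp)
    have hy : pvWF points y := hwf y (by simp)
    have hM : pvM points y x = pvM points x y := pvM_symm points y x hy hx
    rw [pvVals_cons, pvVals_cons, pvVals_cons, pvVals_cons]
    have hcomm : ((List.filterMap (pvM points y) l ++ (List.filterMap (pvM points x) l ++ pvVals points l)).Perm
        (List.filterMap (pvM points x) l ++ (List.filterMap (pvM points y) l ++ pvVals points l))) := by
      have := (List.perm_append_comm (l₁ := List.filterMap (pvM points y) l)
        (l₂ := List.filterMap (pvM points x) l)).append_right (pvVals points l)
      simpa [List.append_assoc] using this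
    rcases hc : pvM points x y with _ | v
    · have hc' : pvM points y x = none := by rw [hM, hc]
      simpa only [List.filterMap_cons, hc, hc'] using hcomm
    · have hc' : pvM points y x = some v := by rw [hM, hc]
      simpa only [List.filterMap_cons, hc, hc', List.cons_append] using hcomm.cons v
  | trans h1 h2 ih1 ih2 =>
    exact (ih1 hwf).trans (ih2 (fun e he => hwf e (h1.mem_iff.mpr he)))

lemma pvAInner_eq (points : List (Int × Int)) (e : Int × Int × Int × Int × Int) :
    ∀ (rest : List (Int × Int × Int × Int × Int)) (ans : Int),
    (∀ f ∈ rest, pvKeyA e ≤ pvKeyA f) →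
    rest.Pairwise (fun a b => pvKeyA a ≤ pvKeyA b) →
    pvAInner points e rest ans = (rest.filterMap (pvM points e)).foldl pvStep ans := by
  intro rest
  induction rest with
  | nil => intro ans _ _; rfl
  | cons f r ih =>
    intro ans hle hp
    by_cases hc : (f.1 = e.1 ∧ f.2.1 = e.2.1 ∧ f.2.2.1 = e.2.2.1)
    · have hM : pvM points e f = some (pvV points (pvIdx e) (pvIdx f)) := by
        simp [pvM, hc]
      simp only [pvAInner, if_pos hc, List.filterMap_cons, hM, List.foldl_cons]
      exact ih _ (fun g hg => hle g (List.mem_cons_of_mem _ hg)) (List.pairwise_cons.mp hp).2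
    · have hne : pvKey3 f ≠ pvKey3 e := fun hk => hc ((pvKey3_iff e f).mpr hk)
      have hlt : pvKeyA e < pvKeyA f :=
        lt_of_le_of_ne (hle f (List.mem_cons_self))
          (fun hE => hne (((pvKeyA_eq_iff e f).mp hE).symm))
      have hnil : List.filterMap (pvM points e) (f :: r) = [] := by
        rw [List.filterMap_eq_nil_iff]
        intro g hg
        have hgne : pvKey3 g ≠ pvKey3 e := by
          rcases List.mem_cons.mp hg with rfl | hgr
          · exact hne
          · have h1 : pvKeyA f ≤ pvKeyA g := (List.pairwise_cons.mp hp).1 g hgr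
            exact fun hk =>
              (ne_of_lt (lt_of_lt_of_le hlt h1)) ((pvKeyA_eq_iff e g).mpr hk.symm)
        have hcg : ¬(g.1 = e.1 ∧ g.2.1 = e.2.1 ∧ g.2.2.1 = e.2.2.1) :=
          fun hcc => hgne ((pvKey3_iff e g).mp hcc)
        simp [pvM, hcg]
      rw [hnil]
      simp only [pvAInner, if_neg hc, List.foldl_nil]

lemma pvAOuter_eq (points : List (Int × Int)) :
    ∀ (L : List (Int × Int × Int × Int × Int)) (ans : Int),
    L.Pairwise (fun a b => pvKeyA a ≤ pvKeyA b) →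
    pvAOuter points L ans = (pvVals points L).foldl pvStep ans := by
  intro L
  induction L with
  | nil => intro ans _; rfl
  | cons e rest ih =>
    intro ans hp
    obtain ⟨hhead, htail⟩ := List.pairwise_cons.mp hp
    simp only [pvAOuter, pvVals_cons, List.foldl_append]
    rw [pvAInner_eq points e rest ans hhead htail]
    exact ih _ htail

lemma pvPartition {α κ : Type} [DecidableEq κ] (key : α → κ) :
    ∀ (ks : List κ) (L : List α), ks.Nodup → (∀ e ∈ L, key e ∈ ks) →
    (ks.flatMap (fun k => L.filter (fun e => key e = k))).Perm L := by
  intro ks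
  induction ks with
  | nil =>
    intro L _ hcov
    cases L with
    | nil => exact .refl _
    | cons e t => exact absurd (hcov e (by simp)) (by simp)
  | cons k ks ih =>
    intro L hnd hcov
    simp only [List.flatMap_cons]
    have hknotin : k ∉ ks := (List.nodup_cons.mp hnd).1
    have hrw : ∀ k' ∈ ks, L.filter (fun e => decide (key e = k')) =
        (L.filter (fun e => !decide (key e = k))).filter (fun e => decide (key e = k')) := by
      intro k' hk'
      have hkk : k' ≠ k := fun h => hknotin (h ▸ hk')
      rw [List.filter_filter]
      apply List.filter_congr
      intro x hx
      by_cases h : key x = k'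
      · simp [h, hkk]
      · simp [h]
    have hflat : ks.flatMap (fun k' => L.filter (fun e => decide (key e = k'))) =
        ks.flatMap (fun k' => (L.filter (fun e => !decide (key e = k))).filter
          (fun e => decide (key e = k'))) := by
      unfold List.flatMap
      rw [List.map_congr_left hrw]
    rw [hflat]
    have hcov' : ∀ e ∈ L.filter (fun e => !decide (key e = k)), key e ∈ ks := by
      intro e he
      have hm := List.mem_filter.mp he
      have h2 : key e ≠ k := by simpa using hm.2
      rcases List.mem_cons.mp (hcov e hm.1) with h | h
      · exact absurd h h2
      · exact h
    exact (List.Perm.append_left _ (ih _ (List.nodup_cons.mp hnd).2 hcov')).trans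
      (List.filter_append_perm _ L)

lemma pvLinesA_eq_map (points : List (Int × Int)) :
    pvLinesA points =
      ((PySem.List.pyRange 0 (points.length : Int) 1).flatMap (fun i =>
        (PySem.List.pyRange (i + 1) (points.length : Int) 1).map (fun j => (i, j)))).map
        (fun ij => pvEnt points ij.1 ij.2) := by
  unfold pvLinesA
  conv_rhs => rw [← List.nil_append (List.map _ _)]
  rw [← PySem.List.foldl_append_singleton_eq_map (fun ij : Int × Int => pvEnt points ij.1 ij.2) _ []]
  rw [List.foldl_flatMap]
  simp only [List.foldl_map]

lemma pvGroups_eq_foldl (points : List (Int × Int)) :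
    pvGroups points = (pvLinesA points).foldl
      (fun d e => d.modify (pvKey3 e) [] (· ++ [pvIdx e])) PySem.Dict.empty := by
  rw [pvLinesA_eq_map, List.foldl_map, List.foldl_flatMap]
  simp only [List.foldl_map]
  rfl

lemma pvGroups_values (points : List (Int × Int)) :
    (pvGroups points).values =
      (PySem.Set.ofList ((pvLinesA points).map pvKey3)).map (fun k =>
        ((pvLinesA points).filter (fun e => pvKey3 e = k)).map pvIdx) := by
  rw [pvGroups_eq_foldl]
  have hmap : (pvLinesA points).foldl
      (fun d e => d.modify (pvKey3 e) [] (· ++ [pvIdx e])) PySem.Dict.empty =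
      ((pvLinesA points).map (fun e => (pvKey3 e, pvIdx e))).foldl
        (fun d p => d.modify p.1 [] (· ++ [p.2])) PySem.Dict.empty := by
    rw [List.foldl_map]
  have hkeys : ((pvLinesA points).foldl
      (fun d e => d.modify (pvKey3 e) [] (· ++ [pvIdx e])) PySem.Dict.empty).keys =
      PySem.Set.ofList ((pvLinesA points).map pvKey3) := by
    rw [PySem.Dict.keys_foldl_modify_key (pvLinesA points) pvKey3 []
      (fun _ e => (· ++ [pvIdx e])) PySem.Dict.empty]
    simp [PySem.Set.update_nil_left]
  have hnd : ((pvLinesA points).foldl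
      (fun d e => d.modify (pvKey3 e) [] (· ++ [pvIdx e])) PySem.Dict.empty).keys.Nodup := by
    apply PySem.Dict.nodup_keys_foldl_modify_key (pvLinesA points) pvKey3 []
      (fun _ e => (· ++ [pvIdx e])) PySem.Dict.empty
    simp
  rw [PySem.Dict.values_eq_map_keys _ hnd []]
  rw [hkeys]
  apply List.map_congr_left
  intro k hk
  rw [hmap, PySem.Dict.getD_foldl_modify_append]
  simp only [PySem.Dict.getD_empty, List.nil_append, List.filter_map]
  rw [List.map_map]
  congr 1
  apply List.filter_congr
  intro e he
  show (pvKey3 e == k) = decide (pvKey3 e = k)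
  by_cases h : pvKey3 e = k
  · simp [h]
  · simp [h]

lemma pvWF_lines (points : List (Int × Int)) :
    ∀ e ∈ pvLinesA points, pvWF points e := by
  rw [pvLinesA_eq_map]
  intro e he
  obtain ⟨ij, _, rfl⟩ := List.mem_map.mp he
  exact ⟨rfl, rfl⟩

lemma pvBInner_eq (points : List (Int × Int)) (a : Int × Int) :
    ∀ (rest : List (Int × Int)) (ans : Int),
    pvBInner points (pvP points a.1) (pvP points a.2) rest ans =
      (rest.map (fun b => pvV points a b)).foldl pvStep ans := by
  intro rest
  induction rest with
  | nil => intro ans; rfl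
  | cons pr r ih =>
    intro ans
    simp only [pvBInner, List.map_cons, List.foldl_cons]
    exact ih _

lemma pvBOuter_eq (points : List (Int × Int)) :
    ∀ (g : List (Int × Int)) (ans : Int),
    pvBOuter points g ans = ((pvPairs g).map (fun pq => pvV points pq.1 pq.2)).foldl pvStep ans := by
  intro g
  induction g with
  | nil => intro ans; rfl
  | cons pr rest ih =>
    intro ans
    simp only [pvBOuter, pvPairs, List.map_append, List.map_map, List.foldl_append]
    have hbi := pvBInner_eq points pr rest ans
    simp only [pvP] at hbi
    rw [hbi]
    exact ih _

lemma pvVals_split (points : List (Int × Int)) :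
    ∀ (g t : List (Int × Int × Int × Int × Int)),
    (∀ a ∈ g, ∀ b ∈ t, pvKey3 b ≠ pvKey3 a) →
    pvVals points (g ++ t) = pvVals points g ++ pvVals points t := by
  intro g
  induction g with
  | nil => intro t _; simp [pvVals, pvPairs]
  | cons x g' ih =>
    intro t hdisj
    rw [List.cons_append, pvVals_cons, pvVals_cons, List.filterMap_append]
    have hnil : t.filterMap (pvM points x) = [] := by
      rw [List.filterMap_eq_nil_iff]
      intro b hb
      have hne := hdisj x List.mem_cons_self b hb
      have hcb : ¬(b.1 = x.1 ∧ b.2.1 = x.2.1 ∧ b.2.2.1 = x.2.2.1) :=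
        fun hcc => hne ((pvKey3_iff x b).mp hcc)
      simp [pvM, hcb]
    rw [hnil, List.append_nil, ih t (fun a ha b hb => hdisj a (List.mem_cons_of_mem _ ha) b hb),
      List.append_assoc]

lemma pvVals_uniform (points : List (Int × Int)) (k : Int × Int × Int) :
    ∀ (g : List (Int × Int × Int × Int × Int)), (∀ e ∈ g, pvKey3 e = k) →
    pvVals points g = (pvPairs g).map (fun pq => pvV points (pvIdx pq.1) (pvIdx pq.2)) := by
  intro g
  induction g with
  | nil => intro _; rfl
  | cons x g' ih =>
    intro hk
    rw [pvVals_cons]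
    have hfm : g'.filterMap (pvM points x) =
        g'.map (fun f => pvV points (pvIdx x) (pvIdx f)) := by
      rw [List.filterMap_congr (g := fun f => some (pvV points (pvIdx x) (pvIdx f)))
        (by
          intro f hf
          have hkey : pvKey3 f = pvKey3 x := by
            rw [hk f (List.mem_cons_of_mem _ hf), hk x List.mem_cons_self]
          simp [pvM, (pvKey3_iff x f).mpr hkey])]
      rw [show (fun f => some (pvV points (pvIdx x) (pvIdx f))) =
        some ∘ (fun f => pvV points (pvIdx x) (pvIdx f)) from rfl, List.filterMap_eq_map]
    rw [hfm, ih (fun e he => hk e (List.mem_cons_of_mem _ he))]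
    simp [pvPairs, List.map_map]

lemma pvPairs_map {α β : Type} (f : α → β) :
    ∀ (l : List α), pvPairs (l.map f) = (pvPairs l).map (Prod.map f f) := by
  intro l
  induction l with
  | nil => rfl
  | cons x xs ih => simp [pvPairs, ih, List.map_map]

lemma pvBGroups_eq (points : List (Int × Int)) :
    ∀ (ks : List (Int × Int × Int)) (ans : Int), ks.Nodup →
    (ks.map (fun k => ((pvLinesA points).filter (fun e => pvKey3 e = k)).map pvIdx)).foldl
        (fun ans g => pvBOuter points g ans) ans =
      (pvVals points (ks.flatMap (fun k =>
        (pvLinesA points).filter (fun e => pvKey3 e = k)))).foldl pvStep ans := by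
  intro ks
  induction ks with
  | nil => intro ans _; rfl
  | cons k ks' ih =>
    intro ans hnd
    have hknotin : k ∉ ks' := (List.nodup_cons.mp hnd).1
    simp only [List.map_cons, List.foldl_cons, List.flatMap_cons]
    have hdisj : ∀ a ∈ (pvLinesA points).filter (fun e => pvKey3 e = k),
        ∀ b ∈ ks'.flatMap (fun k' => (pvLinesA points).filter (fun e => pvKey3 e = k')),
        pvKey3 b ≠ pvKey3 a := by
      intro a ha b hb
      have hak : pvKey3 a = k := of_decide_eq_true (List.mem_filter.mp ha).2
      obtain ⟨k', hk', hbf⟩ := List.mem_flatMap.mp hb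
      have hbk : pvKey3 b = k' := of_decide_eq_true (List.mem_filter.mp hbf).2
      rw [hak, hbk]
      exact fun h => hknotin (h ▸ hk')
    rw [pvVals_split points _ _ hdisj, List.foldl_append]
    have hgv : pvBOuter points (((pvLinesA points).filter (fun e => pvKey3 e = k)).map pvIdx) ans =
        (pvVals points ((pvLinesA points).filter (fun e => pvKey3 e = k))).foldl pvStep ans := by
      rw [pvBOuter_eq, pvPairs_map, List.map_map]
      rw [pvVals_uniform points k _
        (fun e he => of_decide_eq_true (List.mem_filter.mp he).2)]
      rfl
    rw [hgv]
    exact ih _ (List.nodup_cons.mp hnd).2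

-- ===== VERDICT (by name: the statement is the Claim_ definition above) =====
theorem compute_max_rectangle_area_py_spec : Claim_equal_compute_max_rectangle_area_py := by
  intro points _
  unfold Spec_compute_max_rectangle_area_py
  unfold compute_max_rectangle_area_py compute_max_rectangle_area_py_alt
  have hwfL := pvWF_lines points
  rw [pvAOuter_eq points _ 0 (PySem.List.sorted_pairwise (pvLinesA points) pvKeyA)]
  rw [pvGroups_values points]
  rw [pvBGroups_eq points _ 0 (PySem.Set.nodup_ofList _)]
  have hperm1 : (pvVals points (PySem.List.sorted (pvLinesA points) pvKeyA)).Perm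
      (pvVals points (pvLinesA points)) :=
    pvVals_perm points (PySem.List.sorted_perm (pvLinesA points) pvKeyA false)
      (fun e he => hwfL e ((PySem.List.sorted_perm (pvLinesA points) pvKeyA false).subset he))
  have hcov : ∀ e ∈ pvLinesA points,
      pvKey3 e ∈ PySem.Set.ofList ((pvLinesA points).map pvKey3) := by
    intro e he
    rw [PySem.Set.mem_ofList]
    exact List.mem_map_of_mem he
  have hpart := pvPartition pvKey3 (PySem.Set.ofList ((pvLinesA points).map pvKey3))
    (pvLinesA points) (PySem.Set.nodup_ofList _) hcov
  have hperm2 : (pvVals points ((PySem.Set.ofList ((pvLinesA points).map pvKey3)).flatMap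
      (fun k => (pvLinesA points).filter (fun e => pvKey3 e = k)))).Perm
      (pvVals points (pvLinesA points)) :=
    pvVals_perm points hpart (by
      intro e he
      obtain ⟨k, _, hef⟩ := List.mem_flatMap.mp he
      exact hwfL e (List.mem_filter.mp hef).1)
  rw [@List.Perm.foldl_eq _ _ pvStep _ _ pvStep_rc hperm1 0,
    ← @List.Perm.foldl_eq _ _ pvStep _ _ pvStep_rc hperm2 0]
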